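-- pv_equiv track=rewrite | github.com/slalit360/scalar_practice | DSA/Array/class_3_carry_forward/light_bulb.py | get_min_switches_naive
-- ===== SOURCE A (Python) =====
-- def get_min_switches_naive(A):
--     # TC : O(n^2)
--     # SC : O(1)
--     count = 0
--     n = len(A)
--     for i in range(n):
--         if A[i] == 0:
--             for j in range(i, n):
--                 A[j] = A[j] ^ 1
--             count += 1
--     return count
-- ===== SOURCE B (Python) =====
-- def get_min_switches_naive(A):
--     # After `count` suffix flips, element a reads as a ^ (count % 2),
--     # which is 0 exactly when a == count % 2.  (Does not mutate A, unlike the original.)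
--     count = 0
--     for a in A:
--         if a == count % 2:
--             count += 1
--     return count
-- ===== Notes on version B (the rewrite author's own statement) =====
-- stated objective: simpler
-- what changed: Replaces the nested loop that re-flips the whole suffix on every zero by a single pass that tracks the flip parity (count % 2) and compares each element against it, never mutating the list.
import Mathlib
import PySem

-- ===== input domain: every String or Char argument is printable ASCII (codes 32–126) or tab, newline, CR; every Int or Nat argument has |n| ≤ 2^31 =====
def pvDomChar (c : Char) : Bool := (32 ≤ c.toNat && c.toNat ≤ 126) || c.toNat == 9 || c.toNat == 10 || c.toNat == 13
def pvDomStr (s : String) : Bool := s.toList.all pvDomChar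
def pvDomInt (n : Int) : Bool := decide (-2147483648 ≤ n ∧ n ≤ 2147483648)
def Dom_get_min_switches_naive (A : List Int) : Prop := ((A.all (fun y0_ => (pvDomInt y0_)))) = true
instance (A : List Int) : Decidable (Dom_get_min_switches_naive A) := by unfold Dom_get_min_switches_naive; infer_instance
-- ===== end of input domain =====

-- B tracks the flip parity (count % 2) in a single pass instead of re-flipping the suffix on every zero.
-- Return-value equivalence only: the Python A mutates its argument list in place, B does not.

-- ===== PORT A =====
-- inner loop `for j in range(i, n): A[j] = A[j] ^ 1`
def pvFlipStep (a : List Int) (j : Nat) : List Int := a.set j (PySem.Int.bxor (a.getD j 0) 1)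

def pvFlipInner (arr : List Int) (i n : Nat) : List Int :=
  (List.range' i (n - i)).foldl pvFlipStep arr

def get_min_switches_naive (A : List Int) : Int :=
  -- n = len(A); indices i always in range, so A[i] is arr.getD i 0
  ((List.range A.length).foldl
     (fun (st : List Int × Int) i =>
        if st.1.getD i 0 = 0 then (pvFlipInner st.1 i A.length, st.2 + 1) else st)
     (A, (0 : Int))).2

-- ===== PORT B =====
def get_min_switches_naive_alt (A : List Int) : Int :=
  A.foldl (fun count a => if a = count % 2 then count + 1 else count) 0

-- ===== PRECONDITION & SPEC =====
def Spec_get_min_switches_naive (A : List Int) (out : Int) : Prop := out = get_min_switches_naive_alt A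
instance (A : List Int) (out : Int) : Decidable (Spec_get_min_switches_naive A out) := by unfold Spec_get_min_switches_naive; infer_instance

-- ===== CLAIM (what is proved, stated in full; the proofs are below) =====
def Claim_equal_get_min_switches_naive : Prop := ∀ (A : List Int), Dom_get_min_switches_naive A → Spec_get_min_switches_naive A (get_min_switches_naive A)

-- ===== LEMMAS AND PROOFS =====

-- value an element reads as after `count` suffix flips, p = count % 2
def pvFlipP (p a : Int) : Int := if p = 1 then PySem.Int.bxor a 1 else a

theorem pvBxor_one_one (a : Int) : PySem.Int.bxor (PySem.Int.bxor a 1) 1 = a := by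
  unfold PySem.Int.bxor
  by_cases h1 : 0 ≤ a
  · rw [if_pos h1, if_pos (show (0:Int) ≤ 1 by norm_num)]
    rw [if_pos (Int.natCast_nonneg _), if_pos (show (0:Int) ≤ 1 by norm_num)]
    rw [Int.toNat_one, Int.toNat_natCast, Nat.xor_xor_cancel_right]
    omega
  · rw [if_neg h1, if_pos (show (0:Int) ≤ 1 by norm_num), Int.toNat_one]
    have hnn : (0:Int) ≤ (((-a - 1).toNat ^^^ 1 : Nat) : Int) := Int.natCast_nonneg _
    rw [if_neg (by omega : ¬ (0:Int) ≤ -(((-a - 1).toNat ^^^ 1 : Nat) : Int) - 1),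
        if_pos (show (0:Int) ≤ 1 by norm_num)]
    rw [show (-(-(((-a - 1).toNat ^^^ 1 : Nat) : Int) - 1) - 1).toNat
          = (-a - 1).toNat ^^^ 1 by omega]
    rw [Nat.xor_xor_cancel_right]
    omega

theorem pvBxor_one_eq_zero (a : Int) : PySem.Int.bxor a 1 = 0 ↔ a = 1 := by
  unfold PySem.Int.bxor
  by_cases h1 : 0 ≤ a
  · rw [if_pos h1, if_pos (show (0:Int) ≤ 1 by norm_num), Int.toNat_one]
    rw [show (((a.toNat ^^^ 1 : Nat)) : Int) = 0 ↔ a.toNat ^^^ 1 = 0 by omega,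
        Nat.xor_eq_zero_iff]
    omega
  · rw [if_neg h1, if_pos (show (0:Int) ≤ 1 by norm_num), Int.toNat_one]
    have hnn : (0:Int) ≤ (((-a - 1).toNat ^^^ 1 : Nat) : Int) := Int.natCast_nonneg _
    constructor <;> intro h <;> omega

theorem pvFlipInner_fold_length (k : Nat) :
    ∀ (i : Nat) (arr : List Int),
      ((List.range' i k).foldl pvFlipStep arr).length = arr.length := by
  induction k with
  | zero => intro i arr; simp
  | succ k ih =>
      intro i arr
      rw [List.range'_succ, List.foldl_cons, ih]
      simp [pvFlipStep]

theorem pvFlipInner_fold_getD (k : Nat) :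
    ∀ (i : Nat) (arr : List Int) (j : Nat), i + k ≤ arr.length →
      ((List.range' i k).foldl pvFlipStep arr).getD j 0
        = if i ≤ j ∧ j < i + k then PySem.Int.bxor (arr.getD j 0) 1 else arr.getD j 0 := by
  induction k with
  | zero => intro i arr j _; rw [if_neg (by omega)]; simp
  | succ k ih =>
      intro i arr j hlen
      rw [List.range'_succ, List.foldl_cons]
      have hi : i < arr.length := by omega
      rw [show pvFlipStep arr i = arr.set i (PySem.Int.bxor (arr.getD i 0) 1) from rfl]
      rw [ih (i + 1) _ j (by simp; omega)]
      by_cases hji : j = i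
      · subst hji
        rw [if_neg (by omega), if_pos ⟨le_refl j, by omega⟩]
        simp [List.getD, hi]
      · have hset : (arr.set i (PySem.Int.bxor (arr.getD i 0) 1)).getD j 0 = arr.getD j 0 := by
          simp [List.getD, List.getElem?_set_ne (by omega : i ≠ j)]
        by_cases h2 : i + 1 ≤ j ∧ j < i + 1 + k
        · rw [if_pos h2, if_pos (by omega), hset]
        · rw [if_neg h2, if_neg (by omega), hset]

theorem pvMain (A0 : List Int) (k : Nat) :
    ∀ (i : Nat) (arr : List Int) (count : Int),
      i + k = A0.length → arr.length = A0.length → 0 ≤ count →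
      (∀ j, i ≤ j → j < A0.length → arr.getD j 0 = pvFlipP (count % 2) (A0.getD j 0)) →
      ((List.range' i k).foldl
        (fun (st : List Int × Int) t =>
          if st.1.getD t 0 = 0 then (pvFlipInner st.1 t A0.length, st.2 + 1) else st)
        (arr, count)).2
      = (A0.drop i).foldl (fun count a => if a = count % 2 then count + 1 else count) count := by
  induction k with
  | zero =>
      intro i arr count hk _ _ _
      have hd : A0.drop i = [] := List.drop_of_length_le (by omega)
      simp [hd]
  | succ k ih =>
      intro i arr count hk hlen hc hinv
      have hi : i < A0.length := by omega
      rw [List.range'_succ, List.foldl_cons]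
      rw [List.drop_eq_getElem_cons hi, List.foldl_cons]
      have hgetA : A0[i] = A0.getD i 0 := by
        simp [List.getD, List.getElem?_eq_getElem hi]
      have hp : count % 2 = 0 ∨ count % 2 = 1 := by omega
      have hiv := hinv i (le_refl i) hi
      have hcond : (arr.getD i 0 = 0) ↔ (A0.getD i 0 = count % 2) := by
        rcases hp with hp | hp <;> rw [hiv, hp] <;> simp [pvFlipP]
        exact pvBxor_one_eq_zero _
      by_cases hz : arr.getD i 0 = 0
      · rw [if_pos hz, if_pos (by rw [hgetA]; exact hcond.mp hz)]
        apply ih (i + 1) _ (count + 1) (by omega)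
          (by unfold pvFlipInner; rw [pvFlipInner_fold_length]; exact hlen) (by omega)
        intro j hj1 hj2
        have hflip : (pvFlipInner arr i A0.length).getD j 0 = PySem.Int.bxor (arr.getD j 0) 1 := by
          unfold pvFlipInner
          rw [pvFlipInner_fold_getD (A0.length - i) i arr j (by omega)]
          rw [if_pos (by omega)]
        rw [hflip, hinv j (by omega) hj2]
        have hp' : (count + 1) % 2 = 1 - count % 2 := by omega
        rcases hp with hp | hp <;> rw [hp', hp] <;> simp [pvFlipP, pvBxor_one_one]
      · rw [if_neg hz, if_neg (by rw [hgetA]; exact fun h => hz (hcond.mpr h))]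
        exact ih (i + 1) arr count (by omega) hlen hc
          (fun j hj1 hj2 => hinv j (by omega) hj2)

-- ===== VERDICT (by name: the statement is the Claim_ definition above) =====
theorem get_min_switches_naive_spec : Claim_equal_get_min_switches_naive := by
  intro A _
  unfold Spec_get_min_switches_naive get_min_switches_naive get_min_switches_naive_alt
  rw [List.range_eq_range']
  have := pvMain A A.length 0 A 0 (by omega) rfl (by omega)
    (fun j _ _ => by simp [pvFlipP])
  simpa using this
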